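-- pv_equiv track=rewrite | github.com/tosoba/Grind | advent_of_code_2020/d17_conway_cubes.py | simulate_4d_cycles
-- ===== SOURCE A (Python) =====
-- import copy
-- from typing import List, Tuple
--
-- def neighbours_coordinates_4d(x: int, y: int, z: int, w: int,
--                               hyper_cube: List[List[List[List[bool]]]],
--                               neighbour_offsets: List[Tuple[int, int, int, int]]) -> List[Tuple[int, int, int, int]]:
--     return [(x + x_offset, y + y_offset, z + z_offset, w + w_offset)
--             for x_offset, y_offset, z_offset, w_offset in neighbour_offsets
--             if 0 <= x + x_offset < len(hyper_cube)
--             and 0 <= y + y_offset < len(hyper_cube[0])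
--             and 0 <= z + z_offset < len(hyper_cube[0][0])
--             and 0 <= w + w_offset < len(hyper_cube[0][0][0])]
--
-- def simulate_4d_cycles(initial_pocket: List[List[bool]], number_of_cycles: int = 6) -> int:
--     hyper_cube = [[initial_pocket]]
--     neighbour_offsets = [(x, y, z, w)
--                          for x in range(-1, 2)
--                          for y in range(-1, 2)
--                          for z in range(-1, 2)
--                          for w in range(-1, 2)
--                          if x != 0 or y != 0 or z != 0 or w != 0]
--
--     def new_inactive_pocket() -> List[List[bool]]:
--         return [[False for _ in range(len(hyper_cube[0][0][0]))] for _ in range(len(hyper_cube[0][0]))]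
--
--     def new_inactive_cube() -> List[List[List[bool]]]:
--         return [[[False for _ in range(len(hyper_cube[0][0][0]))]
--                  for _ in range(len(hyper_cube[0][0]))]
--                 for _ in range(len(hyper_cube[0]))]
--
--     for cycle in range(0, number_of_cycles):
--         for cube in hyper_cube:
--             for pocket in cube:
--                 pocket.insert(0, [False] * len(pocket[0]))
--                 pocket.append([False] * len(pocket[0]))
--
--                 for strip in pocket:
--                     strip.insert(0, False)
--                     strip.append(False)
--
--             cube.insert(0, new_inactive_pocket())
--             cube.append(new_inactive_pocket())
--
--         hyper_cube.insert(0, new_inactive_cube())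
--         hyper_cube.append(new_inactive_cube())
--
--         modified_hyper_cube = copy.deepcopy(hyper_cube)
--         for x, cube in enumerate(hyper_cube):
--             for y, pocket in enumerate(cube):
--                 for z, strip in enumerate(pocket):
--                     for w, active in enumerate(strip):
--                         neighbours = neighbours_coordinates_4d(x, y, z, w, hyper_cube, neighbour_offsets)
--                         if active:
--                             active_count = 0
--                             for nx, ny, nz, nw in neighbours:
--                                 if hyper_cube[nx][ny][nz][nw]:
--                                     active_count += 1
--                                 if active_count > 3:
--                                     break
--                             modified_hyper_cube[x][y][z][w] = active_count == 2 or active_count == 3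
--                         else:
--                             active_count = 0
--                             for nx, ny, nz, nw in neighbours:
--                                 if hyper_cube[nx][ny][nz][nw]:
--                                     active_count += 1
--                                 if active_count > 3:
--                                     break
--                             modified_hyper_cube[x][y][z][w] = active_count == 3
--         hyper_cube = modified_hyper_cube
--
--     active_count = 0
--     for cube in hyper_cube:
--         for pocket in cube:
--             for strip in pocket:
--                 for active in strip:
--                     if active:
--                         active_count += 1
--     return active_count
-- ===== SOURCE B (Python) =====
-- # Sparse simulation: keep only the set of active coordinates and tally
-- # neighbour counts in a dict; never builds or pads a dense 4D array.
-- def simulate_4d_cycles(initial_pocket, number_of_cycles=6):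
--     active = {(0, 0, z, w)
--               for z, row in enumerate(initial_pocket)
--               for w, v in enumerate(row) if v}
--     offsets = [(dx, dy, dz, dw)
--                for dx in (-1, 0, 1) for dy in (-1, 0, 1)
--                for dz in (-1, 0, 1) for dw in (-1, 0, 1)
--                if (dx, dy, dz, dw) != (0, 0, 0, 0)]
--     for _ in range(number_of_cycles):
--         tally = {}
--         for x, y, z, w in active:
--             for dx, dy, dz, dw in offsets:
--                 c = (x + dx, y + dy, z + dz, w + dw)
--                 tally[c] = tally.get(c, 0) + 1
--         active = {c for c, n in tally.items()
--                   if n == 3 or (n == 2 and c in active)}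
--     return len(active)
-- ===== Notes on version B (the rewrite author's own statement) =====
-- stated objective: faster
-- what changed: B replaces A's dense simulation (a 4D array grown by in-place padding each cycle, deepcopied, and rescanned cell by cell with a precomputed clamped offset list) by a sparse one: only the set of active coordinates is kept, each cycle tallies the 80 neighbours of every active cell into a dict, and the next generation is read straight off the tally, so work is proportional to the active cells instead of the whole bounding box.
-- outside the precondition, e.g. on simulate_4d_cycles([[True], [True], [False, False, True]], 1): A returns 0, B returns 9; on simulate_4d_cycles([], 1): A raises IndexError, B returns 0; on simulate_4d_cycles([], 6): A raises IndexError, B returns 0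
import Mathlib
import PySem

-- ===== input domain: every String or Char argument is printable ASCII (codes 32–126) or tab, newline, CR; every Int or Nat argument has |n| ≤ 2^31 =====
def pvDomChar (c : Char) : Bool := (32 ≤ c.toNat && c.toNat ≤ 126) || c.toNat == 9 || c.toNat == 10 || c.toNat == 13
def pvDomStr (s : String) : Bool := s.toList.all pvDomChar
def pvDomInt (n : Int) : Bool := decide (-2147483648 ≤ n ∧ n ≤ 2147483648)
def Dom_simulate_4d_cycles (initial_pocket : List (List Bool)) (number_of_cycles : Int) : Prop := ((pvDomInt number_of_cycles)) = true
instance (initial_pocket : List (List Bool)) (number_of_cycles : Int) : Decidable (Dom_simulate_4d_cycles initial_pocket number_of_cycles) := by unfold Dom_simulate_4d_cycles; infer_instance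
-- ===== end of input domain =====

-- B replaces A's growing dense 4D array by a sparse simulation over the set of active
-- coordinates with a dict neighbour tally, so each cycle's work scales with the active cells, not the bounding box. A mutates initial_pocket
-- in place while padding; B does not: the equivalence proved here is about the RETURN value only.


abbrev PvGrid := List (List (List (List Bool)))
abbrev PvC := Int × Int × Int × Int

-- ===== PORT A =====
-- strip.insert(0, False); strip.append(False)
def pvPadStripA (s : List Bool) : List Bool := [false] ++ s ++ [false]

-- pocket.insert(0, [False]*len(pocket[0])); pocket.append(...); then pad every strip
-- (Python indexes pocket[0], which raises on an empty pocket; headD is total — those inputs are outside Pre_)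
def pvPadPocketA (p : List (List Bool)) : List (List Bool) :=
  (([List.replicate (p.headD []).length false] ++ p) ++ [List.replicate (p.headD []).length false]).map pvPadStripA

-- the 80 neighbour offsets: [(x,y,z,w) for x in range(-1,2) ... if x != 0 or y != 0 or z != 0 or w != 0]
def pvOffsetsA : List PvC :=
  (PySem.List.pyRange (-1) 2 1).flatMap fun x =>
    (PySem.List.pyRange (-1) 2 1).flatMap fun y =>
      (PySem.List.pyRange (-1) 2 1).flatMap fun z =>
        (PySem.List.pyRange (-1) 2 1).filterMap fun w =>
          if x ≠ 0 ∨ y ≠ 0 ∨ z ≠ 0 ∨ w ≠ 0 then some (x, y, z, w) else none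

-- neighbours_coordinates_4d (bounds read off row 0 at each level, as Python's len(hyper_cube[0]..) does)
def pvNeighboursA (x y z w : Int) (P : PvGrid) : List PvC :=
  (pvOffsetsA.filter fun o =>
      decide (0 ≤ x + o.1 ∧ x + o.1 < (P.length : Int)) &&
      decide (0 ≤ y + o.2.1 ∧ y + o.2.1 < ((P.headD []).length : Int)) &&
      decide (0 ≤ z + o.2.2.1 ∧ z + o.2.2.1 < (((P.headD []).headD []).length : Int)) &&
      decide (0 ≤ w + o.2.2.2 ∧ w + o.2.2.2 < ((((P.headD []).headD []).headD []).length : Int))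
  ).map fun o => (x + o.1, y + o.2.1, z + o.2.2.1, w + o.2.2.2)

-- hyper_cube[nx][ny][nz][nw]: plain indexing; the filter above keeps it in range under Pre_
def pvReadA (P : PvGrid) (n : PvC) : Bool :=
  (((P.getD n.1.toNat []).getD n.2.1.toNat []).getD n.2.2.1.toNat []).getD n.2.2.2.toNat false

-- the neighbour-counting loop with its 'if active_count > 3: break'
def pvCountCapA (P : PvGrid) : List PvC → Int → Int
  | [], c => c
  | n :: t, c =>
    let c' := if pvReadA P n then c + 1 else c
    if c' > 3 then c' else pvCountCapA P t c'

def pvInactPocketA (hc1 : PvGrid) : List (List Bool) :=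
  List.replicate ((hc1.headD []).headD []).length
    (List.replicate (((hc1.headD []).headD []).headD []).length false)

-- the padding phase of one cycle (pad pockets/strips, insert inactive pockets and cubes)
def pvPadA (hc : PvGrid) : PvGrid :=
  let hc1 := hc.map fun cu => cu.map pvPadPocketA
  let inactP := pvInactPocketA hc1
  let hc2 := hc1.map fun cu => [inactP] ++ cu ++ [inactP]
  let inactC := List.replicate (hc2.headD []).length inactP
  [inactC] ++ hc2 ++ [inactC]

-- the update phase: every cell of the deep copy is overwritten exactly once by the enumerate
-- loop nest, which this mapIdx nest transcribes position for position
def pvStepA (hc : PvGrid) : PvGrid :=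
  let P := pvPadA hc
  P.mapIdx fun x cu => cu.mapIdx fun y p => p.mapIdx fun z s => s.mapIdx fun w active =>
    let ns := pvNeighboursA (x : Int) (y : Int) (z : Int) (w : Int) P
    if active then
      let c := pvCountCapA P ns 0
      c == 2 || c == 3
    else
      let c := pvCountCapA P ns 0
      c == 3

-- the final nested counting loops
def pvCountA (hc : PvGrid) : Int :=
  hc.foldl (fun a cu => cu.foldl (fun a p => p.foldl (fun a s =>
    s.foldl (fun a b => if b then a + 1 else a) a) a) a) 0

def simulate_4d_cycles (initial_pocket : List (List Bool)) (number_of_cycles : Int) : Int :=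
  pvCountA ((PySem.List.pyRange 0 number_of_cycles 1).foldl (fun g _ => pvStepA g) [[initial_pocket]])

-- ===== PORT B =====
-- {(0, 0, z, w) for z, row in enumerate(initial_pocket) for w, v in enumerate(row) if v}
def pvInitList (ip : List (List Bool)) : List PvC :=
  (PySem.List.enumerate ip 0).flatMap fun zr =>
    (PySem.List.enumerate zr.2 0).filterMap fun wv =>
      if wv.2 then some (0, 0, zr.1, wv.1) else none

def pvInitB (ip : List (List Bool)) : PySem.Set PvC := PySem.Set.ofList (pvInitList ip)

-- [(dx,dy,dz,dw) for dx in (-1,0,1) ... if (dx,dy,dz,dw) != (0,0,0,0)]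
def pvOffB : List PvC :=
  ([-1, 0, 1] : List Int).flatMap fun dx =>
    ([-1, 0, 1] : List Int).flatMap fun dy =>
      ([-1, 0, 1] : List Int).flatMap fun dz =>
        ([-1, 0, 1] : List Int).filterMap fun dw =>
          if (dx, dy, dz, dw) ≠ ((0 : Int), (0 : Int), (0 : Int), (0 : Int))
          then some (dx, dy, dz, dw) else none

-- c = (x + dx, y + dy, z + dz, w + dw)
def pvShift (u o : PvC) : PvC := (u.1 + o.1, u.2.1 + o.2.1, u.2.2.1 + o.2.2.1, u.2.2.2 + o.2.2.2)

-- tally = {}; for cell in active: for off in offsets: tally[cell+off] = tally.get(cell+off, 0) + 1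
def pvTallyB (S : PySem.Set PvC) : PySem.Dict PvC Int :=
  S.foldl (fun t u =>
    pvOffB.foldl (fun t o => t.insert (pvShift u o) (t.getD (pvShift u o) 0 + 1)) t)
    PySem.Dict.empty

-- active = {c for c, n in tally.items() if n == 3 or (n == 2 and c in active)}
def pvStepSp (S : PySem.Set PvC) : PySem.Set PvC :=
  PySem.Set.ofList
    (((pvTallyB S).items.filter fun p =>
        p.2 == 3 || (p.2 == 2 && PySem.Set.contains S p.1)).map Prod.fst)

def simulate_4d_cycles_alt (initial_pocket : List (List Bool)) (number_of_cycles : Int) : Int :=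
  (((PySem.List.pyRange 0 number_of_cycles 1).foldl (fun S _ => pvStepSp S)
      (pvInitB initial_pocket)).length : Int)

-- ===== PRECONDITION & SPEC =====
-- When cycles > 0, Pre_ keeps only nonempty rectangular initial pockets: on [] A raises IndexError
-- (pocket[0]), and on ragged input A pads and bounds-checks neighbours by row 0's length alone, so it
-- raises IndexError or returns an accidental value of that malformed-grid handling.
def Pre_simulate_4d_cycles (initial_pocket : List (List Bool)) (number_of_cycles : Int) : Prop :=
  0 < number_of_cycles →
    (initial_pocket ≠ [] ∧ ∀ row ∈ initial_pocket, row.length = (initial_pocket.headD []).length)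
instance (initial_pocket : List (List Bool)) (number_of_cycles : Int) : Decidable (Pre_simulate_4d_cycles initial_pocket number_of_cycles) := by unfold Pre_simulate_4d_cycles; infer_instance

def pvWitness_simulate_4d_cycles : List (List Bool) × Int := ([[true, true, true]], 1)

def Spec_simulate_4d_cycles (initial_pocket : List (List Bool)) (number_of_cycles : Int) (out : Int) : Prop := out = simulate_4d_cycles_alt initial_pocket number_of_cycles
instance (initial_pocket : List (List Bool)) (number_of_cycles : Int) (out : Int) : Decidable (Spec_simulate_4d_cycles initial_pocket number_of_cycles out) := by unfold Spec_simulate_4d_cycles; infer_instance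

-- ===== CLAIM (what is proved, stated in full; the proofs are below) =====
def Claim_equal_simulate_4d_cycles : Prop := ∀ (initial_pocket : List (List Bool)) (number_of_cycles : Int), Dom_simulate_4d_cycles initial_pocket number_of_cycles → Pre_simulate_4d_cycles initial_pocket number_of_cycles → Spec_simulate_4d_cycles initial_pocket number_of_cycles (simulate_4d_cycles initial_pocket number_of_cycles)

-- ===== LEMMAS AND PROOFS =====

-- ---------- dense reading of a grid (proof-internal; out-of-range reads are False) ----------
def pvCellS (s : List Bool) (w : Int) : Bool :=
  if 0 ≤ w ∧ w < (s.length : Int) then s.getD w.toNat false else false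

def pvCellP (p : List (List Bool)) (z w : Int) : Bool :=
  if 0 ≤ z ∧ z < (p.length : Int) then pvCellS (p.getD z.toNat []) w else false

def pvCellC (cu : List (List (List Bool))) (y z w : Int) : Bool :=
  if 0 ≤ y ∧ y < (cu.length : Int) then pvCellP (cu.getD y.toNat []) z w else false

def pvCell (g : PvGrid) (x y z w : Int) : Bool :=
  if 0 ≤ x ∧ x < (g.length : Int) then pvCellC (g.getD x.toNat []) y z w else false

-- proof-internal dense step in rule form (centre + 80-offset count)
def pvStepD (g : PvGrid) : PvGrid :=
  let A : Int := (g.length : Int) + 2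
  let B : Int := ((g.headD []).length : Int) + 2
  let C : Int := (((g.headD []).headD []).length : Int) + 2
  let D : Int := ((((g.headD []).headD []).headD []).length : Int) + 2
  (PySem.List.pyRange 0 A 1).map fun x =>
    (PySem.List.pyRange 0 B 1).map fun y =>
      (PySem.List.pyRange 0 C 1).map fun z =>
        (PySem.List.pyRange 0 D 1).map fun w =>
          let n := pvOffsetsA.countP fun o =>
            pvCell g (x - 1 + o.1) (y - 1 + o.2.1) (z - 1 + o.2.2.1) (w - 1 + o.2.2.2)
          (n == 3 || (pvCell g (x - 1) (y - 1) (z - 1) (w - 1) && n == 2))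

def pvCountD (g : PvGrid) : Int :=
  ((g.flatMap fun cu => cu.flatMap fun p => p.flatMap fun s => s).map
    fun v => if v then (1 : Int) else 0).sum

-- rectangular grid with dimensions a × b × c × d
def PvRect (g : PvGrid) (a b c d : Nat) : Prop :=
  g.length = a ∧ ∀ cu ∈ g, cu.length = b ∧ ∀ p ∈ cu, p.length = c ∧ ∀ s ∈ p, s.length = d

-- the dense grid G at shift s holds exactly the active set S (original coordinates)
def PvDM (G : PvGrid) (S : List PvC) (s : Int) : Prop :=
  ∀ x y z w : Int, pvCell G x y z w = decide (((x - s, y - s, z - s, w - s) : PvC) ∈ S)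

-- neighbour count of a cell against the sparse set
def pvNC (S : List PvC) (c : PvC) : Nat :=
  pvOffsetsA.countP fun o => decide (pvShift c o ∈ S)

theorem pv_read_pad {α : Type} (L' l : List α) (h : α → α) (e0 e1 d d' : α) (r : α → Bool)
    (hL : L' = [e0] ++ l.map h ++ [e1]) (h0 : r e0 = false) (h1 : r e1 = false) (i : Int) :
    (if 0 ≤ i ∧ i < (L'.length : Int) then r (L'.getD i.toNat d) else false)
      = if 0 ≤ i - 1 ∧ i - 1 < (l.length : Int) then r (h (l.getD (i - 1).toNat d')) else false := by
  subst hL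
  simp only [List.length_append, List.length_map, List.length_cons, List.length_nil]
  rw [List.append_assoc]
  split_ifs with hA hB hB
  · push_cast at hA hB
    have hk : ∃ k : Nat, i.toNat = k + 1 ∧ k < l.length ∧ (i - 1).toNat = k :=
      ⟨i.toNat - 1, by omega, by omega, by omega⟩
    obtain ⟨k, hk1, hk2, hk3⟩ := hk
    rw [hk1, hk3]
    rw [List.getD_append_right _ _ _ _ (by simp)]
    simp only [List.length_cons, List.length_nil, Nat.add_sub_cancel]
    rw [List.getD_append _ _ _ _ (by simpa using hk2)]
    rw [List.getD_eq_getElem _ _ (by simpa using hk2), List.getD_eq_getElem _ _ hk2]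
    simp
  · push_cast at hA hB
    by_cases hz : i = 0
    · subst hz; simp [h0]
    · have he : i = (l.length : Int) + 1 := by omega
      subst he
      have ht : (((l.length : Int)) + 1).toNat = l.length + 1 := by omega
      rw [ht]
      rw [List.getD_append_right _ _ _ _ (by simp)]
      rw [List.getD_append_right _ _ _ _ (by simp)]
      simpa using h1
  · push_cast at hA hB; omega
  · rfl

theorem pv_cellS_pad (s : List Bool) (w : Int) :
    pvCellS (pvPadStripA s) w = pvCellS s (w - 1) := by
  unfold pvCellS
  exact pv_read_pad (pvPadStripA s) s id false false false false (fun b => b)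
    (by simp [pvPadStripA]) rfl rfl w

theorem pv_cellP_pad (p : List (List Bool)) (z w : Int) :
    pvCellP (pvPadPocketA p) z w = pvCellP p (z - 1) (w - 1) := by
  have hsh : pvPadPocketA p
      = [pvPadStripA (List.replicate (p.headD []).length false)] ++ p.map pvPadStripA
        ++ [pvPadStripA (List.replicate (p.headD []).length false)] := by
    unfold pvPadPocketA
    simp [List.map_append]
  have h0 : pvCellS (pvPadStripA (List.replicate (p.headD []).length false)) w = false := by
    rw [pv_cellS_pad]
    unfold pvCellS
    split_ifs with hw
    · have hw' : (w - 1).toNat < (p.headD []).length := by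
        simp only [List.length_replicate] at hw; omega
      rw [List.getD_eq_getElem _ _ (by simpa using hw'), List.getElem_replicate]
    · rfl
  have := pv_read_pad (pvPadPocketA p) p pvPadStripA _ _ [] [] (fun s => pvCellS s w) hsh h0 h0 z
  unfold pvCellP
  rw [this]
  simp only [pv_cellS_pad]

theorem pv_cellP_inact (r c : Nat) (z w : Int) :
    pvCellP (List.replicate r (List.replicate c false)) z w = false := by
  unfold pvCellP
  split_ifs with hz
  · have hlt : z.toNat < r := by
      simp only [List.length_replicate] at hz; omega
    rw [List.getD_eq_getElem _ _ (by simpa using hlt), List.getElem_replicate]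
    unfold pvCellS
    split_ifs with hw
    · have hw' : w.toNat < c := by
        simp only [List.length_replicate] at hw; omega
      rw [List.getD_eq_getElem _ _ (by simpa using hw'), List.getElem_replicate]
    · rfl
  · rfl

theorem pv_cellC_pad (cu : List (List (List Bool))) (r c : Nat) (y z w : Int) :
    pvCellC ([List.replicate r (List.replicate c false)] ++ cu.map pvPadPocketA
        ++ [List.replicate r (List.replicate c false)]) y z w
      = pvCellC cu (y - 1) (z - 1) (w - 1) := by
  have h0 : pvCellP (List.replicate r (List.replicate c false)) z w = false := pv_cellP_inact r c z w
  have := pv_read_pad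
      ([List.replicate r (List.replicate c false)] ++ cu.map pvPadPocketA
        ++ [List.replicate r (List.replicate c false)]) cu pvPadPocketA _ _ [] []
      (fun p => pvCellP p z w) rfl h0 h0 y
  unfold pvCellC
  rw [this]
  simp only [pv_cellP_pad]

theorem pv_cell_padA (hc : PvGrid) (x y z w : Int) :
    pvCell (pvPadA hc) x y z w = pvCell hc (x - 1) (y - 1) (z - 1) (w - 1) := by
  unfold pvPadA pvInactPocketA
  set rr := (((hc.map fun cu => cu.map pvPadPocketA).headD []).headD []).length with hrr
  set cc := ((((hc.map fun cu => cu.map pvPadPocketA).headD []).headD []).headD []).length with hcc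
  set inactP := List.replicate rr (List.replicate cc false) with hip
  set hc2 := (hc.map fun cu => cu.map pvPadPocketA).map fun cu => [inactP] ++ cu ++ [inactP] with hhc2
  set inactC := List.replicate (hc2.headD []).length inactP with hic
  have h0 : pvCellC inactC y z w = false := by
    unfold pvCellC
    split_ifs with hy
    · have hy' : y.toNat < (hc2.headD []).length := by
        simp only [hic, List.length_replicate] at hy; omega
      rw [hic, List.getD_eq_getElem _ _ (by simpa using hy'), List.getElem_replicate]
      exact pv_cellP_inact rr cc z w
    · rfl
  have hsh : ([inactC] ++ hc2 ++ [inactC] : PvGrid)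
      = [inactC] ++ hc.map (fun cu => [inactP] ++ cu.map pvPadPocketA ++ [inactP]) ++ [inactC] := by
    rw [hhc2, List.map_map]
    rfl
  have := pv_read_pad ([inactC] ++ hc2 ++ [inactC]) hc
      (fun cu => [inactP] ++ cu.map pvPadPocketA ++ [inactP]) _ _ [] []
      (fun cu => pvCellC cu y z w) hsh h0 h0 x
  unfold pvCell
  rw [this]
  simp only [hip]
  simp only [pv_cellC_pad]

theorem pv_headD_mem {α : Type} (l : List α) (d : α) (h : l ≠ []) : l.headD d ∈ l := by
  cases l with
  | nil => exact absurd rfl h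
  | cons x t => simp

theorem pv_rect_heads (g : PvGrid) (a b c d : Nat) (ha : 1 ≤ a) (hb : 1 ≤ b) (hc1 : 1 ≤ c)
    (hR : PvRect g a b c d) :
    g ≠ [] ∧ g.headD [] ≠ [] ∧ (g.headD []).headD [] ≠ [] ∧
    (g.headD []).length = b ∧ ((g.headD []).headD []).length = c ∧
    (((g.headD []).headD []).headD []).length = d := by
  obtain ⟨hlen, hmem⟩ := hR
  have hg : g ≠ [] := by intro h; subst h; simp at hlen; omega
  obtain ⟨hblen, hmem2⟩ := hmem _ (pv_headD_mem g [] hg)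
  have hcu : g.headD [] ≠ [] := by intro h; rw [h] at hblen; simp at hblen; omega
  obtain ⟨hclen, hmem3⟩ := hmem2 _ (pv_headD_mem _ [] hcu)
  have hp : (g.headD []).headD [] ≠ [] := by intro h; rw [h] at hclen; simp at hclen; omega
  have hdlen := hmem3 _ (pv_headD_mem _ [] hp)
  exact ⟨hg, hcu, hp, hblen, hclen, hdlen⟩

theorem pv_headD_map {α β : Type} (f : α → β) (l : List α) (d : β) (d' : α) (h : l ≠ []) :
    (l.map f).headD d = f (l.headD d') := by
  cases l with
  | nil => exact absurd rfl h
  | cons x t => simp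

theorem pv_len_padStrip (s : List Bool) : (pvPadStripA s).length = s.length + 2 := by
  simp [pvPadStripA]

theorem pv_len_padPocket (p : List (List Bool)) : (pvPadPocketA p).length = p.length + 2 := by
  simp [pvPadPocketA]

theorem pv_strips_padPocket (p : List (List Bool)) (c d : Nat) (hc1 : 1 ≤ c)
    (hp : p.length = c) (hd : ∀ s ∈ p, s.length = d) :
    ∀ s ∈ pvPadPocketA p, s.length = d + 2 := by
  intro s hs
  have hhead : (p.headD []).length = d := hd _ (pv_headD_mem p [] (by intro h; rw [h] at hp; simp at hp; omega))
  unfold pvPadPocketA at hs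
  simp only [List.mem_map, List.mem_append, List.mem_singleton] at hs
  obtain ⟨x, hx, rfl⟩ := hs
  rw [pv_len_padStrip]
  rcases hx with (hx | hx) | hx
  · simp at hx hhead; subst hx; simp only [List.length_replicate]; omega
  · rw [hd x hx]
  · subst hx; simp only [List.length_replicate]; rw [hhead]

theorem pv_headD_padPocket (p : List (List Bool)) :
    (pvPadPocketA p).headD [] = pvPadStripA (List.replicate (p.headD []).length false) := by
  simp [pvPadPocketA]

theorem pv_rect_padA (hc : PvGrid) (a b c d : Nat) (ha : 1 ≤ a) (hb : 1 ≤ b) (hc1 : 1 ≤ c)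
    (hR : PvRect hc a b c d) : PvRect (pvPadA hc) (a + 2) (b + 2) (c + 2) (d + 2) := by
  obtain ⟨hg, hcu0, hp0, hblen, hclen, hdlen⟩ := pv_rect_heads hc a b c d ha hb hc1 hR
  obtain ⟨hlen, hmem⟩ := hR
  simp only [pvPadA, pvInactPocketA]
  set hc1' := hc.map fun cu => cu.map pvPadPocketA with hhc1
  have hh1 : hc1'.headD [] = (hc.headD []).map pvPadPocketA := by
    rw [hhc1, pv_headD_map _ _ _ [] hg]
  have hh2 : (hc1'.headD []).headD [] = pvPadPocketA ((hc.headD []).headD []) := by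
    rw [hh1, pv_headD_map _ _ _ [] hcu0]
  have hrr : ((hc1'.headD []).headD []).length = c + 2 := by
    rw [hh2, pv_len_padPocket, hclen]
  have hcc : (((hc1'.headD []).headD []).headD []).length = d + 2 := by
    rw [hh2, pv_headD_padPocket, hdlen]
    simp [pvPadStripA]
  rw [hrr, hcc]
  set inactP := List.replicate (c + 2) (List.replicate (d + 2) false) with hip
  have hinactPrect : inactP.length = c + 2 ∧ ∀ s ∈ inactP, s.length = d + 2 := by
    constructor
    · simp [hip]
    · intro s hs
      rw [hip] at hs
      rw [List.eq_of_mem_replicate hs]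
      simp
  set hc2' := hc1'.map fun cu => [inactP] ++ cu ++ [inactP] with hhc2
  have hcub : ∀ cu ∈ hc2', cu.length = b + 2 ∧ ∀ p ∈ cu, p.length = c + 2 ∧ ∀ s ∈ p, s.length = d + 2 := by
    intro cu hcu
    rw [hhc2, hhc1] at hcu
    simp only [List.map_map, List.mem_map, Function.comp] at hcu
    obtain ⟨cu0, hcu0m, rfl⟩ := hcu
    obtain ⟨hbl, hmem2⟩ := hmem _ hcu0m
    constructor
    · simp [hbl]
    · intro p hp
      simp only [List.mem_append, List.mem_singleton, List.mem_map] at hp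
      rcases hp with (hp | hp) | hp
      · subst hp; exact ⟨hinactPrect.1, hinactPrect.2⟩
      · obtain ⟨p0, hp0m, rfl⟩ := hp
        obtain ⟨hcl, hmem3⟩ := hmem2 _ hp0m
        exact ⟨by rw [pv_len_padPocket, hcl], pv_strips_padPocket p0 c d hc1 hcl hmem3⟩
      · subst hp; exact ⟨hinactPrect.1, hinactPrect.2⟩
  have hlen2 : (hc2'.headD []).length = b + 2 := by
    have hne2 : hc2' ≠ [] := by
      rw [hhc2, hhc1]
      intro h
      exact hg (by simpa using h)
    exact (hcub _ (pv_headD_mem _ [] hne2)).1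
  rw [hlen2]
  constructor
  · rw [hhc2, hhc1]
    simp [hlen]
  · intro cu hcu
    simp only [List.mem_append, List.mem_singleton] at hcu
    rcases hcu with (hcu | hcu) | hcu
    · subst hcu
      refine ⟨by simp, ?_⟩
      intro p hp
      rw [List.eq_of_mem_replicate hp]
      exact ⟨hinactPrect.1, hinactPrect.2⟩
    · exact hcub _ hcu
    · subst hcu
      refine ⟨by simp, ?_⟩
      intro p hp
      rw [List.eq_of_mem_replicate hp]
      exact ⟨hinactPrect.1, hinactPrect.2⟩

theorem pv_countCap_eq (P : PvGrid) (ns : List PvC) (cacc : Int)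
    (h0 : 0 ≤ cacc) (h3 : cacc ≤ 3) :
    pvCountCapA P ns cacc = min (cacc + (ns.countP (pvReadA P) : Int)) 4 := by
  induction ns generalizing cacc with
  | nil => simp [pvCountCapA]; omega
  | cons n t ih =>
    rw [pvCountCapA, List.countP_cons]
    cases hn : pvReadA P n with
    | true =>
      simp only [if_true]
      by_cases hc : cacc + 1 > 3
      · rw [if_pos hc]
        have hnn : (0:Int) ≤ (t.countP (pvReadA P) : Int) := by positivity
        push_cast
        omega
      · rw [if_neg hc, ih _ (by omega) (by omega)]
        push_cast
        omega
    | false =>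
      simp only [if_neg (by simp : ¬(false = true))]
      rw [if_neg (by omega), ih _ h0 h3]
      simp

theorem pv_cell_getElem (g : PvGrid) (x y z w : Nat) (hx : x < g.length)
    (hy : y < g[x].length) (hz : z < g[x][y].length) (hw : w < g[x][y][z].length) :
    pvCell g x y z w = g[x][y][z][w] := by
  rw [pvCell, if_pos ⟨Int.natCast_nonneg x, by exact_mod_cast hx⟩]
  simp only [Int.toNat_natCast]
  rw [List.getD_eq_getElem _ _ hx]
  rw [pvCellC, if_pos ⟨Int.natCast_nonneg y, by exact_mod_cast hy⟩]
  simp only [Int.toNat_natCast]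
  rw [List.getD_eq_getElem _ _ hy]
  rw [pvCellP, if_pos ⟨Int.natCast_nonneg z, by exact_mod_cast hz⟩]
  simp only [Int.toNat_natCast]
  rw [List.getD_eq_getElem _ _ hz]
  rw [pvCellS, if_pos ⟨Int.natCast_nonneg w, by exact_mod_cast hw⟩]
  simp only [Int.toNat_natCast]
  rw [List.getD_eq_getElem _ _ hw]

theorem pv_read_cell (P : PvGrid) (A B C D : Nat) (hR : PvRect P A B C D) (i j k l : Int) :
    (pvReadA P (i, j, k, l) &&
      (decide (0 ≤ i ∧ i < (A : Int)) && decide (0 ≤ j ∧ j < (B : Int)) &&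
       decide (0 ≤ k ∧ k < (C : Int)) && decide (0 ≤ l ∧ l < (D : Int))))
      = pvCell P i j k l := by
  obtain ⟨hPlen, hPmem⟩ := hR
  rw [pvCell, hPlen]
  by_cases h1 : 0 ≤ i ∧ i < (A : Int)
  · rw [if_pos h1]
    have hi : i.toNat < P.length := by omega
    rw [List.getD_eq_getElem _ _ hi]
    obtain ⟨hbl, hm2⟩ := hPmem _ (List.getElem_mem hi)
    rw [pvCellC, hbl]
    by_cases h2 : 0 ≤ j ∧ j < (B : Int)
    · rw [if_pos h2]
      have hj : j.toNat < P[i.toNat].length := by omega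
      rw [List.getD_eq_getElem _ _ hj]
      obtain ⟨hcl, hm3⟩ := hm2 _ (List.getElem_mem hj)
      rw [pvCellP, hcl]
      by_cases h3 : 0 ≤ k ∧ k < (C : Int)
      · rw [if_pos h3]
        have hk : k.toNat < P[i.toNat][j.toNat].length := by omega
        rw [List.getD_eq_getElem _ _ hk]
        have hdl := hm3 _ (List.getElem_mem hk)
        rw [pvCellS, hdl]
        by_cases h4 : 0 ≤ l ∧ l < (D : Int)
        · rw [if_pos h4]
          have hl : l.toNat < P[i.toNat][j.toNat][k.toNat].length := by omega
          rw [List.getD_eq_getElem _ _ hl]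
          have hD : (decide (0 ≤ i ∧ i < (A : Int)) && decide (0 ≤ j ∧ j < (B : Int)) &&
              decide (0 ≤ k ∧ k < (C : Int)) && decide (0 ≤ l ∧ l < (D : Int))) = true := by
            simp [h1, h2, h3, h4]
          rw [hD, Bool.and_true]
          simp only [pvReadA]
          rw [List.getD_eq_getElem _ _ hi, List.getD_eq_getElem _ _ hj,
            List.getD_eq_getElem _ _ hk, List.getD_eq_getElem _ _ hl]
        · rw [if_neg h4]
          simp [h4]
      · rw [if_neg h3]
        simp [h3]
    · rw [if_neg h2]
      simp [h2]
  · rw [if_neg h1]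
    simp [h1]

-- A's mutate-pad-copy cycle computes the rule-form dense step
theorem pv_stepAD (g : PvGrid) (a b c d : Nat) (ha : 1 ≤ a) (hb : 1 ≤ b) (hc1 : 1 ≤ c)
    (hR : PvRect g a b c d) : pvStepA g = pvStepD g := by
  obtain ⟨hg, hcu0, hp0, hblen, hclen, hdlen⟩ := pv_rect_heads g a b c d ha hb hc1 hR
  have hRP : PvRect (pvPadA g) (a + 2) (b + 2) (c + 2) (d + 2) :=
    pv_rect_padA g a b c d ha hb hc1 hR
  obtain ⟨hgP, hcu0P, hp0P, hblenP, hclenP, hdlenP⟩ :=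
    pv_rect_heads (pvPadA g) (a + 2) (b + 2) (c + 2) (d + 2) (by omega) (by omega) (by omega) hRP
  obtain ⟨hPlen, hPmem⟩ := hRP
  simp only [pvStepA, pvStepD, hR.1, hblen, hclen, hdlen]
  apply List.ext_getElem
  · simp [hPlen, PySem.List.length_pyRange_one]
    omega
  intro x hx1 hx2
  rw [List.getElem_mapIdx, List.getElem_map, PySem.List.getElem_pyRange_one]
  have hx1' : x < (pvPadA g).length := by simpa using hx1
  obtain ⟨hcul, hm2⟩ := hPmem _ (List.getElem_mem hx1')
  apply List.ext_getElem
  · simp [hcul, PySem.List.length_pyRange_one]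
    omega
  intro y hy1 hy2
  rw [List.getElem_mapIdx, List.getElem_map, PySem.List.getElem_pyRange_one]
  have hy1' : y < (pvPadA g)[x].length := by simpa using hy1
  obtain ⟨hpl, hm3⟩ := hm2 _ (List.getElem_mem hy1')
  apply List.ext_getElem
  · simp [hpl, PySem.List.length_pyRange_one]
    omega
  intro z hz1 hz2
  rw [List.getElem_mapIdx, List.getElem_map, PySem.List.getElem_pyRange_one]
  have hz1' : z < (pvPadA g)[x][y].length := by simpa using hz1
  have hsl := hm3 _ (List.getElem_mem hz1')
  apply List.ext_getElem
  · simp [hsl, PySem.List.length_pyRange_one]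
    omega
  intro w hw1 hw2
  rw [List.getElem_mapIdx, List.getElem_map, PySem.List.getElem_pyRange_one]
  simp only [zero_add]
  have hw1' : w < (pvPadA g)[x][y][z].length := by simpa using hw1
  have hcellP : pvCell (pvPadA g) x y z w = (pvPadA g)[x][y][z][w] :=
    pv_cell_getElem (pvPadA g) x y z w hx1' hy1' hz1' hw1'
  have hcellg : pvCell g ((x : Int) - 1) ((y : Int) - 1) ((z : Int) - 1) ((w : Int) - 1)
      = (pvPadA g)[x][y][z][w] := by
    rw [← hcellP, pv_cell_padA]
  -- neighbour counts agree
  have hcnt : ((pvNeighboursA x y z w (pvPadA g)).countP (pvReadA (pvPadA g)) : Nat)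
      = pvOffsetsA.countP fun o =>
          pvCell g ((x : Int) - 1 + o.1) ((y : Int) - 1 + o.2.1)
            ((z : Int) - 1 + o.2.2.1) ((w : Int) - 1 + o.2.2.2) := by
    rw [pvNeighboursA]
    rw [List.countP_map, List.countP_filter]
    apply List.countP_congr
    intro o _
    simp only [Function.comp]
    rw [hPlen, hblenP, hclenP, hdlenP]
    rw [pv_read_cell (pvPadA g) (a + 2) (b + 2) (c + 2) (d + 2) ⟨hPlen, hPmem⟩]
    rw [pv_cell_padA]
    rw [show (x : Int) + o.1 - 1 = (x : Int) - 1 + o.1 from by ring,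
        show (y : Int) + o.2.1 - 1 = (y : Int) - 1 + o.2.1 from by ring,
        show (z : Int) + o.2.2.1 - 1 = (z : Int) - 1 + o.2.2.1 from by ring,
        show (w : Int) + o.2.2.2 - 1 = (w : Int) - 1 + o.2.2.2 from by ring]
  rw [pv_countCap_eq _ _ 0 (by omega) (by omega), hcnt, hcellg, zero_add]
  set n := pvOffsetsA.countP fun o =>
      pvCell g ((x : Int) - 1 + o.1) ((y : Int) - 1 + o.2.1)
        ((z : Int) - 1 + o.2.2.1) ((w : Int) - 1 + o.2.2.2) with hn
  cases hA : (pvPadA g)[x][y][z][w] with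
  | true =>
    simp only [if_true, Bool.true_and]
    rw [Bool.eq_iff_iff]
    simp only [Bool.or_eq_true, beq_iff_eq]
    omega
  | false =>
    simp only [Bool.false_and, Bool.false_eq_true, if_false]
    rw [Bool.eq_iff_iff]
    simp only [Bool.or_eq_true, beq_iff_eq, Bool.false_and, Bool.false_eq_true, or_false]
    omega

theorem pv_len_mapRange {α : Type} (f : Int → α) (n : Int) :
    (((PySem.List.pyRange 0 n 1).map f)).length = n.toNat := by
  simp [PySem.List.length_pyRange_one]

theorem pv_getD_mapRange {α : Type} (f : Int → α) (n i : Int) (d : α)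
    (h1 : 0 ≤ i) (h2 : i < n) :
    ((PySem.List.pyRange 0 n 1).map f).getD i.toNat d = f i := by
  rw [← PySem.List.pyGetD_of_nonneg _ d h1,
    PySem.List.pyGetD_map_pyRange_of_nonneg f n i d h1 h2]

theorem pv_rect_stepD (g : PvGrid) (a b c d : Nat) (ha : 1 ≤ a) (hb : 1 ≤ b) (hc1 : 1 ≤ c)
    (hR : PvRect g a b c d) : PvRect (pvStepD g) (a + 2) (b + 2) (c + 2) (d + 2) := by
  obtain ⟨hg, hcu0, hp0, hblen, hclen, hdlen⟩ := pv_rect_heads g a b c d ha hb hc1 hR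
  obtain ⟨hlen, _⟩ := hR
  unfold pvStepD
  simp only [hlen, hblen, hclen, hdlen]
  constructor
  · simp [PySem.List.length_pyRange_one]
    omega
  · intro cu hcu
    simp only [List.mem_map] at hcu
    obtain ⟨x, _, rfl⟩ := hcu
    refine ⟨by simp [PySem.List.length_pyRange_one]; omega, ?_⟩
    intro p hp
    simp only [List.mem_map] at hp
    obtain ⟨y, _, rfl⟩ := hp
    refine ⟨by simp [PySem.List.length_pyRange_one]; omega, ?_⟩
    intro s hs
    simp only [List.mem_map] at hs
    obtain ⟨z, _, rfl⟩ := hs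
    simp [PySem.List.length_pyRange_one]
    omega

theorem pv_foldl_add {α : Type} (f : Int → α → Int) (gf : α → Int)
    (hfg : ∀ a x, f a x = a + gf x) :
    ∀ (l : List α) (acc : Int), l.foldl f acc = acc + (l.map gf).sum := by
  intro l
  induction l with
  | nil => simp
  | cons x t ih => intro acc; simp only [List.foldl_cons, List.map_cons, List.sum_cons, hfg, ih, add_assoc]

theorem pv_sum_flatMap {α β : Type} (l : List α) (f : α → List β) (m : β → Int) :
    ((l.flatMap f).map m).sum = (l.map fun x => ((f x).map m).sum).sum := by
  induction l with
  | nil => simp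
  | cons x t ih => simp [List.flatMap_cons, List.map_append, List.sum_append, ih]

theorem pv_countAD (g : PvGrid) : pvCountA g = pvCountD g := by
  have hS : ∀ (acc : Int) (s : List Bool),
      s.foldl (fun a b => if b then a + 1 else a) acc
        = acc + (s.map fun v => if v then (1:Int) else 0).sum :=
    fun acc s => pv_foldl_add _ _ (fun a b => by cases b <;> simp) s acc
  have hP : ∀ (acc : Int) (p : List (List Bool)),
      p.foldl (fun a s => s.foldl (fun a b => if b then a + 1 else a) a) acc
        = acc + (p.map fun s => (s.map fun v => if v then (1:Int) else 0).sum).sum :=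
    fun acc p => pv_foldl_add _ _ (fun a s => hS a s) p acc
  have hC : ∀ (acc : Int) (cu : List (List (List Bool))),
      cu.foldl (fun a p => p.foldl (fun a s => s.foldl (fun a b => if b then a + 1 else a) a) a) acc
        = acc + (cu.map fun p => (p.map fun s => (s.map fun v => if v then (1:Int) else 0).sum).sum).sum :=
    fun acc cu => pv_foldl_add _ _ (fun a p => hP a p) cu acc
  have hG : pvCountA g
      = (g.map fun cu => (cu.map fun p => (p.map fun s => (s.map fun v => if v then (1:Int) else 0).sum).sum).sum).sum := by
    unfold pvCountA
    rw [pv_foldl_add _ _ (fun a cu => hC a cu) g 0, zero_add]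
  rw [hG]
  unfold pvCountD
  rw [pv_sum_flatMap, List.map_congr_left]
  intro cu _
  rw [pv_sum_flatMap, List.map_congr_left]
  intro p _
  rw [pv_sum_flatMap]

-- ---------- sparse-side facts ----------
theorem pv_offB_eq : pvOffB = pvOffsetsA := by decide

theorem pv_nodup_offs : pvOffsetsA.Nodup := by decide

theorem pv_offs_bound : ∀ o ∈ pvOffsetsA,
    (-1 ≤ o.1 ∧ o.1 ≤ 1) ∧ (-1 ≤ o.2.1 ∧ o.2.1 ≤ 1) ∧
    (-1 ≤ o.2.2.1 ∧ o.2.2.1 ≤ 1) ∧ (-1 ≤ o.2.2.2 ∧ o.2.2.2 ≤ 1) := by decide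

def pvNeg (o : PvC) : PvC := (-o.1, -o.2.1, -o.2.2.1, -o.2.2.2)

theorem pv_map_neg_offs : pvOffsetsA.map pvNeg = pvOffsetsA.reverse := by decide

def pvDiff (c u : PvC) : PvC := (c.1 - u.1, c.2.1 - u.2.1, c.2.2.1 - u.2.2.1, c.2.2.2 - u.2.2.2)

theorem pv_shift_eq_iff (u o c : PvC) : pvShift u o = c ↔ o = pvDiff c u := by
  cases u with | mk u1 u => cases u with | mk u2 u => cases u with | mk u3 u4 =>
  cases o with | mk o1 o => cases o with | mk o2 o => cases o with | mk o3 o4 =>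
  cases c with | mk c1 c => cases c with | mk c2 c => cases c with | mk c3 c4 =>
  simp [pvShift, pvDiff, Prod.ext_iff]
  omega

theorem pv_diff_diff (c o : PvC) : pvDiff c (pvDiff c o) = o := by
  cases o; cases c
  simp [pvDiff]

theorem pv_diff_inj (c : PvC) : Function.Injective (pvDiff c) := by
  intro u v h
  have h1 := congrArg (pvDiff c) h
  rwa [pv_diff_diff, pv_diff_diff] at h1

theorem pv_diff_neg (c o : PvC) : pvDiff c (pvNeg o) = pvShift c o := by
  cases o; cases c
  simp [pvDiff, pvNeg, pvShift]

theorem pv_sum_map_add_nat {α : Type} (l : List α) (f g : α → Nat) :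
    (l.map fun x => f x + g x).sum = (l.map f).sum + (l.map g).sum := by
  induction l with
  | nil => simp
  | cons x t ih => simp [ih]; omega

-- counting members of a Nodup list m inside L
theorem pv_countP_mem (L m : List PvC) (hm : m.Nodup) :
    L.countP (fun v => decide (v ∈ m)) = (m.map fun o => L.count o).sum := by
  induction L with
  | nil => simp
  | cons x t ih =>
    rw [List.countP_cons, ih]
    have hsplit : (m.map fun o => (x :: t).count o).sum
        = (m.map fun o => t.count o + if o == x then 1 else 0).sum := by
      apply congrArg
      apply List.map_congr_left
      intro o _
      rw [List.count_cons, Bool.beq_comm]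
    rw [hsplit, pv_sum_map_add_nat]
    have h1 : (m.map fun o => if o == x then (1:Nat) else 0).sum = m.countP (fun o => o == x) :=
      PySem.List.sum_map_ite_one_zero_nat _ _
    have h2 : m.countP (fun o => o == x) = m.count x := rfl
    have h3 : m.count x = if x ∈ m then 1 else 0 := by
      by_cases hx : x ∈ m
      · rw [List.count_eq_one_of_mem hm hx, if_pos hx]
      · rw [List.count_eq_zero.mpr hx, if_neg hx]
    rw [h1, h2, h3]
    by_cases hx : x ∈ m <;> simp [hx]

-- the flat neighbour multiset of the sparse step counts pvNC
theorem pv_count_flat (S : List PvC) (hS : S.Nodup) (c : PvC) :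
    (S.flatMap fun u => pvOffB.map (pvShift u)).count c = pvNC S c := by
  rw [pv_offB_eq, List.count_flatMap]
  have h2 : ∀ u ∈ S, (List.count c ∘ fun u => pvOffsetsA.map (pvShift u)) u
      = if decide (pvDiff c u ∈ pvOffsetsA) then 1 else 0 := by
    intro u _
    simp only [Function.comp]
    have hc1 : (pvOffsetsA.map (pvShift u)).count c
        = pvOffsetsA.countP fun o => pvShift u o == c := by
      rw [show (pvOffsetsA.map (pvShift u)).count c
          = (pvOffsetsA.map (pvShift u)).countP (· == c) from rfl, List.countP_map]
      rfl
    rw [hc1, List.countP_congr (fun o _ => ?_), show pvOffsetsA.countP (· == pvDiff c u)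
        = pvOffsetsA.count (pvDiff c u) from rfl]
    · by_cases hmem : pvDiff c u ∈ pvOffsetsA
      · rw [List.count_eq_one_of_mem pv_nodup_offs hmem]
        simp [hmem]
      · rw [List.count_eq_zero.mpr hmem]
        simp [hmem]
    · simp only [beq_iff_eq]
      exact pv_shift_eq_iff u o c
  rw [List.map_congr_left h2, PySem.List.sum_map_ite_one_zero_nat]
  have h3 : S.countP (fun u => decide (pvDiff c u ∈ pvOffsetsA))
      = (S.map (pvDiff c)).countP (fun v => decide (v ∈ pvOffsetsA)) := by
    rw [List.countP_map]; rfl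
  rw [h3, pv_countP_mem _ _ pv_nodup_offs]
  have h4 : ∀ o ∈ pvOffsetsA, (S.map (pvDiff c)).count o
      = if decide (pvDiff c o ∈ S) then 1 else 0 := by
    intro o _
    rw [show o = pvDiff c (pvDiff c o) from (pv_diff_diff c o).symm,
      List.count_map_of_injective S (pvDiff c) (pv_diff_inj c), pv_diff_diff]
    by_cases hmem : pvDiff c o ∈ S
    · rw [List.count_eq_one_of_mem hS hmem]; simp [hmem]
    · rw [List.count_eq_zero.mpr hmem]; simp [hmem]
  rw [List.map_congr_left h4, PySem.List.sum_map_ite_one_zero_nat]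
  unfold pvNC
  rw [← List.countP_reverse, ← pv_map_neg_offs, List.countP_map]
  apply List.countP_congr
  intro o _
  simp only [Function.comp, pv_diff_neg]

theorem pv_tallyB_eq_counter (S : PySem.Set PvC) :
    pvTallyB S = PySem.Dict.counter (S.flatMap fun u => pvOffB.map (pvShift u)) := by
  unfold pvTallyB
  rw [← PySem.Dict.foldl_insert_getD_add_one_eq_counter, List.foldl_flatMap]
  have hfun : ∀ (t : PySem.Dict PvC Int) (u : PvC),
      pvOffB.foldl (fun t o => t.insert (pvShift u o) (t.getD (pvShift u o) 0 + 1)) t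
        = (pvOffB.map (pvShift u)).foldl (fun d x => d.insert x (d.getD x 0 + 1)) t := by
    intro t u
    rw [List.foldl_map]
  simp only [hfun]

theorem pv_mem_stepSp (S : PySem.Set PvC) (hS : List.Nodup S) (c : PvC) :
    c ∈ pvStepSp S ↔ (pvNC S c = 3 ∨ (pvNC S c = 2 ∧ c ∈ S)) := by
  unfold pvStepSp
  rw [pv_tallyB_eq_counter, PySem.Dict.items_counter, List.filter_map, List.map_map,
    PySem.Set.mem_ofList]
  have hcnt := pv_count_flat S hS
  have hmemN : ∀ v : PvC, v ∈ (S.flatMap fun u => pvOffB.map (pvShift u)) ↔ 0 < pvNC S v := by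
    intro v
    rw [← hcnt v]
    exact List.count_pos_iff.symm
  constructor
  · intro hmem
    simp only [List.mem_map, List.mem_filter, Function.comp] at hmem
    obtain ⟨k, ⟨hk1, hk2⟩, rfl⟩ := hmem
    rw [PySem.Set.mem_ofList] at hk1
    simp only [Bool.or_eq_true, Bool.and_eq_true, beq_iff_eq] at hk2
    rw [hcnt k] at hk2
    rcases hk2 with h3 | ⟨h2, hcon⟩
    · left; exact_mod_cast h3
    · right
      refine ⟨by exact_mod_cast h2, ?_⟩
      rw [← PySem.Set.contains_iff]
      exact hcon
  · intro h
    have hpos : 0 < pvNC S c := by rcases h with h | ⟨h, _⟩ <;> omega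
    simp only [List.mem_map, List.mem_filter, Function.comp]
    refine ⟨c, ⟨?_, ?_⟩, rfl⟩
    · rw [PySem.Set.mem_ofList, hmemN c]
      exact hpos
    · simp only [Bool.or_eq_true, Bool.and_eq_true, beq_iff_eq]
      rw [hcnt c]
      rcases h with h3 | ⟨h2, hmem⟩
      · left; exact_mod_cast h3
      · right
        exact ⟨by exact_mod_cast h2, by rw [PySem.Set.contains_iff]; exact hmem⟩

theorem pv_nodup_stepSp (S : PySem.Set PvC) : List.Nodup (pvStepSp S) :=
  PySem.Set.nodup_ofList _

-- a true cell lies inside the rectangle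
theorem pv_cell_true_range (G : PvGrid) (a b c d : Nat) (hR : PvRect G a b c d)
    (x y z w : Int) (h : pvCell G x y z w = true) :
    (0 ≤ x ∧ x < (a : Int)) ∧ (0 ≤ y ∧ y < (b : Int)) ∧
    (0 ≤ z ∧ z < (c : Int)) ∧ (0 ≤ w ∧ w < (d : Int)) := by
  obtain ⟨hlen, hmem⟩ := hR
  rw [pvCell] at h
  by_cases h1 : 0 ≤ x ∧ x < (G.length : Int)
  · rw [if_pos h1] at h
    have hx : x.toNat < G.length := by omega
    rw [List.getD_eq_getElem _ _ hx] at h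
    obtain ⟨hbl, hm2⟩ := hmem _ (List.getElem_mem hx)
    rw [pvCellC] at h
    by_cases h2 : 0 ≤ y ∧ y < (G[x.toNat].length : Int)
    · rw [if_pos h2] at h
      have hy : y.toNat < G[x.toNat].length := by omega
      rw [List.getD_eq_getElem _ _ hy] at h
      obtain ⟨hcl, hm3⟩ := hm2 _ (List.getElem_mem hy)
      rw [pvCellP] at h
      by_cases h3 : 0 ≤ z ∧ z < (G[x.toNat][y.toNat].length : Int)
      · rw [if_pos h3] at h
        have hz : z.toNat < G[x.toNat][y.toNat].length := by omega
        rw [List.getD_eq_getElem _ _ hz] at h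
        have hdl := hm3 _ (List.getElem_mem hz)
        rw [pvCellS] at h
        by_cases h4 : 0 ≤ w ∧ w < (G[x.toNat][y.toNat][z.toNat].length : Int)
        · rw [hlen] at h1
          rw [hbl] at h2
          rw [hcl] at h3
          rw [hdl] at h4
          exact ⟨h1, h2, h3, h4⟩
        · rw [if_neg h4] at h; exact absurd h (by simp)
      · rw [if_neg h3] at h; exact absurd h (by simp)
    · rw [if_neg h2] at h; exact absurd h (by simp)
  · rw [if_neg h1] at h; exact absurd h (by simp)

-- reading one level of a range-built list
theorem pv_cell_mapRange (f : Int → List (List (List Bool))) (A : Int) (hA : 0 ≤ A)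
    (x y z w : Int) :
    pvCell ((PySem.List.pyRange 0 A 1).map f) x y z w
      = if 0 ≤ x ∧ x < A then pvCellC (f x) y z w else false := by
  unfold pvCell
  rw [pv_len_mapRange]
  by_cases hx : 0 ≤ x ∧ x < A
  · rw [if_pos (by omega), if_pos hx, pv_getD_mapRange f A x [] hx.1 hx.2]
  · rw [if_neg (by omega), if_neg hx]

theorem pv_cellC_mapRange (f : Int → List (List Bool)) (B : Int) (hB : 0 ≤ B) (y z w : Int) :
    pvCellC ((PySem.List.pyRange 0 B 1).map f) y z w
      = if 0 ≤ y ∧ y < B then pvCellP (f y) z w else false := by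
  unfold pvCellC
  rw [pv_len_mapRange]
  by_cases hy : 0 ≤ y ∧ y < B
  · rw [if_pos (by omega), if_pos hy, pv_getD_mapRange f B y [] hy.1 hy.2]
  · rw [if_neg (by omega), if_neg hy]

theorem pv_cellP_mapRange (f : Int → List Bool) (C : Int) (hC : 0 ≤ C) (z w : Int) :
    pvCellP ((PySem.List.pyRange 0 C 1).map f) z w
      = if 0 ≤ z ∧ z < C then pvCellS (f z) w else false := by
  unfold pvCellP
  rw [pv_len_mapRange]
  by_cases hz : 0 ≤ z ∧ z < C
  · rw [if_pos (by omega), if_pos hz, pv_getD_mapRange f C z [] hz.1 hz.2]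
  · rw [if_neg (by omega), if_neg hz]

theorem pv_cellS_mapRange (f : Int → Bool) (D : Int) (hD : 0 ≤ D) (w : Int) :
    pvCellS ((PySem.List.pyRange 0 D 1).map f) w
      = if 0 ≤ w ∧ w < D then f w else false := by
  unfold pvCellS
  rw [pv_len_mapRange]
  by_cases hw : 0 ≤ w ∧ w < D
  · rw [if_pos (by omega), if_pos hw, pv_getD_mapRange f D w false hw.1 hw.2]
  · rw [if_neg (by omega), if_neg hw]

-- the dense cell of the rule-form step
theorem pv_cell_stepD (g : PvGrid) (x y z w : Int) :
    pvCell (pvStepD g) x y z w =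
      if 0 ≤ x ∧ x < (g.length : Int) + 2 ∧ 0 ≤ y ∧ y < ((g.headD []).length : Int) + 2
         ∧ 0 ≤ z ∧ z < (((g.headD []).headD []).length : Int) + 2
         ∧ 0 ≤ w ∧ w < ((((g.headD []).headD []).headD []).length : Int) + 2 then
        ((pvOffsetsA.countP fun o =>
            pvCell g (x - 1 + o.1) (y - 1 + o.2.1) (z - 1 + o.2.2.1) (w - 1 + o.2.2.2)) == 3
         || (pvCell g (x - 1) (y - 1) (z - 1) (w - 1) &&
            (pvOffsetsA.countP fun o =>
              pvCell g (x - 1 + o.1) (y - 1 + o.2.1) (z - 1 + o.2.2.1) (w - 1 + o.2.2.2)) == 2))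
      else false := by
  simp only [pvStepD]
  rw [pv_cell_mapRange _ _ (by omega), pv_cellC_mapRange _ _ (by omega),
    pv_cellP_mapRange _ _ (by omega), pv_cellS_mapRange _ _ (by omega)]
  split_ifs with h1 h2 h3 h4 h5 h5 h5 h5 <;> first | rfl | omega

-- one dense step matches one sparse step
theorem pv_dm_step (G : PvGrid) (S : PySem.Set PvC) (s : Int) (a b c d : Nat)
    (ha : 1 ≤ a) (hb : 1 ≤ b) (hc1 : 1 ≤ c) (hR : PvRect G a b c d)
    (hDM : PvDM G S s) (hS : List.Nodup S) :
    PvDM (pvStepD G) (pvStepSp S) (s + 1) := by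
  obtain ⟨hg, hcu0, hp0, hblen, hclen, hdlen⟩ := pv_rect_heads G a b c d ha hb hc1 hR
  intro x y z w
  rw [pv_cell_stepD, hR.1, hblen, hclen, hdlen]
  have htup : ∀ o : PvC, ((x - 1 + o.1 - s, y - 1 + o.2.1 - s, z - 1 + o.2.2.1 - s,
      w - 1 + o.2.2.2 - s) : PvC)
      = pvShift (x - (s+1), y - (s+1), z - (s+1), w - (s+1)) o := by
    intro o
    simp only [pvShift, Prod.mk.injEq]
    refine ⟨by ring, by ring, by ring, by ring⟩
  have hn : (pvOffsetsA.countP fun o =>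
        pvCell G (x - 1 + o.1) (y - 1 + o.2.1) (z - 1 + o.2.2.1) (w - 1 + o.2.2.2))
      = pvNC S (x - (s+1), y - (s+1), z - (s+1), w - (s+1)) := by
    unfold pvNC
    apply List.countP_congr
    intro o _
    rw [hDM, htup o]
  have hact : pvCell G (x - 1) (y - 1) (z - 1) (w - 1)
      = decide (((x - (s+1), y - (s+1), z - (s+1), w - (s+1)) : PvC) ∈ S) := by
    rw [hDM]
    congr 2 <;> ring
  by_cases hin : 0 ≤ x ∧ x < (a : Int) + 2 ∧ 0 ≤ y ∧ y < (b : Int) + 2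
      ∧ 0 ≤ z ∧ z < (c : Int) + 2 ∧ 0 ≤ w ∧ w < (d : Int) + 2
  · rw [if_pos hin, hn, hact, Bool.eq_iff_iff]
    simp only [Bool.or_eq_true, Bool.and_eq_true, beq_iff_eq, decide_eq_true_iff]
    rw [pv_mem_stepSp S hS]
    tauto
  · rw [if_neg hin]
    symm
    rw [decide_eq_false_iff_not]
    intro hmem
    rw [pv_mem_stepSp S hS] at hmem
    have hpos : 0 < pvNC S (x - (s+1), y - (s+1), z - (s+1), w - (s+1)) := by
      rcases hmem with h | ⟨h, _⟩ <;> omega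
    unfold pvNC at hpos
    rw [List.countP_pos_iff] at hpos
    obtain ⟨o, hoMem, hoS⟩ := hpos
    have hcellTrue : pvCell G (x - 1 + o.1) (y - 1 + o.2.1) (z - 1 + o.2.2.1) (w - 1 + o.2.2.2)
        = true := by
      rw [hDM, htup o]
      exact hoS
    have hrange := pv_cell_true_range G a b c d hR _ _ _ _ hcellTrue
    have hob := pv_offs_bound o hoMem
    omega

-- one row of the initial comprehension
theorem pv_rowFlat_cons_true (t : List Bool) (z0 s0 : Int) :
    (PySem.List.enumerate (true :: t) s0).filterMap
        (fun wv => if wv.2 then some ((0:Int), (0:Int), z0, wv.1) else none)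
      = ((0:Int), (0:Int), z0, s0)
        :: (PySem.List.enumerate t (s0 + 1)).filterMap
            (fun wv => if wv.2 then some ((0:Int), (0:Int), z0, wv.1) else none) := by
  rw [PySem.List.enumerate_cons, List.filterMap_cons]
  simp

theorem pv_rowFlat_cons_false (t : List Bool) (z0 s0 : Int) :
    (PySem.List.enumerate (false :: t) s0).filterMap
        (fun wv => if wv.2 then some ((0:Int), (0:Int), z0, wv.1) else none)
      = (PySem.List.enumerate t (s0 + 1)).filterMap
            (fun wv => if wv.2 then some ((0:Int), (0:Int), z0, wv.1) else none) := by
  rw [PySem.List.enumerate_cons, List.filterMap_cons]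
  simp

theorem pv_mem_rowFlat (row : List Bool) (z0 s0 : Int) (v : PvC) :
    v ∈ (PySem.List.enumerate row s0).filterMap
          (fun wv => if wv.2 then some ((0:Int), (0:Int), z0, wv.1) else none)
      ↔ ∃ k : Nat, ∃ _ : k < row.length, v = (0, 0, z0, s0 + k) ∧ row[k] = true := by
  induction row generalizing s0 with
  | nil => simp [PySem.List.enumerate_nil]
  | cons bv t ih =>
    cases bv with
    | true =>
      rw [pv_rowFlat_cons_true, List.mem_cons, ih (s0 + 1)]
      constructor
      · rintro (rfl | ⟨k, hk, rfl, hrow⟩)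
        · exact ⟨0, by simp, by simp, by simp⟩
        · exact ⟨k + 1, by simp; omega, by simp; omega, by simpa using hrow⟩
      · rintro ⟨k, hk, heq, hrow⟩
        cases k with
        | zero => left; rw [heq]; simp
        | succ k =>
          right
          exact ⟨k, by simpa using hk, by rw [heq]; simp; omega, by simpa using hrow⟩
    | false =>
      rw [pv_rowFlat_cons_false, ih (s0 + 1)]
      constructor
      · rintro ⟨k, hk, rfl, hrow⟩
        exact ⟨k + 1, by simp; omega, by simp; omega, by simpa using hrow⟩
      · rintro ⟨k, hk, heq, hrow⟩
        cases k with
        | zero => simp at hrow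
        | succ k =>
          exact ⟨k, by simpa using hk, by rw [heq]; simp; omega, by simpa using hrow⟩

-- the whole initial comprehension, with a general outer start
theorem pv_mem_initAux (ip : List (List Bool)) (s : Int) (v : PvC) :
    v ∈ (PySem.List.enumerate ip s).flatMap
          (fun zr => (PySem.List.enumerate zr.2 0).filterMap
            (fun wv => if wv.2 then some ((0:Int), (0:Int), zr.1, wv.1) else none))
      ↔ ∃ j : Nat, ∃ _ : j < ip.length, ∃ k : Nat, ∃ _ : k < ip[j].length,
          v = (0, 0, s + j, (k : Int)) ∧ ip[j][k] = true := by
  induction ip generalizing s with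
  | nil => simp [PySem.List.enumerate_nil]
  | cons row t ih =>
    rw [PySem.List.enumerate_cons, List.flatMap_cons, List.mem_append]
    rw [pv_mem_rowFlat row s 0, ih (s + 1)]
    constructor
    · rintro (⟨k, hk, heq, hrow⟩ | ⟨j, hj, k, hk, heq, hjk⟩)
      · exact ⟨0, by simp, k, by simpa using hk,
          by rw [heq]; simp, by simpa using hrow⟩
      · exact ⟨j + 1, by simp; omega, k, by simpa using hk,
          by rw [heq]; simp; omega, by simpa using hjk⟩
    · rintro ⟨j, hj, k, hk, heq, hjk⟩
      cases j with
      | zero =>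
        left
        exact ⟨k, by simpa using hk, by rw [heq]; simp, by simpa using hjk⟩
      | succ j =>
        right
        exact ⟨j, by simpa using hj, k, by simpa using hk,
          by rw [heq]; simp; omega, by simpa using hjk⟩

theorem pv_initList_eq (ip : List (List Bool)) :
    pvInitList ip = (PySem.List.enumerate ip 0).flatMap
        (fun zr => (PySem.List.enumerate zr.2 0).filterMap
          (fun wv => if wv.2 then some ((0:Int), (0:Int), zr.1, wv.1) else none)) := rfl

-- the initial grid [[initial_pocket]] matches the initial sparse set at shift 0
theorem pv_dm_init (ip : List (List Bool)) : PvDM [[ip]] (pvInitB ip) 0 := by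
  intro x y z w
  rw [Bool.eq_iff_iff, decide_eq_true_iff]
  simp only [sub_zero]
  rw [pvInitB, PySem.Set.mem_ofList, pv_initList_eq, pv_mem_initAux]
  unfold pvCell
  by_cases hx : 0 ≤ x ∧ x < (([[ip]] : PvGrid).length : Int)
  · simp only [List.length_cons, List.length_nil] at hx
    have hx0 : x = 0 := by omega
    rw [if_pos (by simpa using hx)]
    subst hx0
    simp only [Int.toNat_zero, List.getD_cons_zero]
    unfold pvCellC
    by_cases hy : 0 ≤ y ∧ y < (([ip] : List (List (List Bool))).length : Int)
    · simp only [List.length_cons, List.length_nil] at hy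
      have hy0 : y = 0 := by omega
      rw [if_pos (by simpa using hy)]
      subst hy0
      simp only [Int.toNat_zero, List.getD_cons_zero]
      unfold pvCellP
      by_cases hz : 0 ≤ z ∧ z < (ip.length : Int)
      · rw [if_pos hz]
        have hzn : z.toNat < ip.length := by omega
        rw [List.getD_eq_getElem _ _ hzn]
        unfold pvCellS
        by_cases hw : 0 ≤ w ∧ w < (ip[z.toNat].length : Int)
        · rw [if_pos hw]
          have hwn : w.toNat < ip[z.toNat].length := by omega
          rw [List.getD_eq_getElem _ _ hwn]
          constructor
          · intro hv
            refine ⟨z.toNat, hzn, w.toNat, hwn, ?_, hv⟩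
            simp
            omega
          · rintro ⟨j, hj, k, hk, heq, hjk⟩
            simp only [Prod.mk.injEq] at heq
            obtain ⟨-, -, hz2, hw2⟩ := heq
            have hjz : j = z.toNat := by omega
            have hkw : k = w.toNat := by omega
            subst hjz; subst hkw
            exact hjk
        · rw [if_neg hw]
          simp only [Bool.false_eq_true, false_iff]
          rintro ⟨j, hj, k, hk, heq, hjk⟩
          simp only [Prod.mk.injEq] at heq
          obtain ⟨-, -, hz2, hw2⟩ := heq
          have hjz : j = z.toNat := by omega
          subst hjz
          omega
      · rw [if_neg hz]
        simp only [Bool.false_eq_true, false_iff]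
        rintro ⟨j, hj, k, hk, heq, hjk⟩
        simp only [Prod.mk.injEq] at heq
        omega
    · rw [if_neg (by simpa using hy)]
      simp only [Bool.false_eq_true, false_iff]
      rintro ⟨j, hj, k, hk, heq, hjk⟩
      simp only [Prod.mk.injEq] at heq
      simp only [List.length_cons, List.length_nil] at hy
      omega
  · rw [if_neg (by simpa using hx)]
    simp only [Bool.false_eq_true, false_iff]
    rintro ⟨j, hj, k, hk, heq, hjk⟩
    simp only [Prod.mk.injEq] at heq
    simp only [List.length_cons, List.length_nil] at hx
    omega

theorem pv_nodup_init (ip : List (List Bool)) : List.Nodup (pvInitB ip) :=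
  PySem.Set.nodup_ofList _

theorem pv_nodup_rowFlat (row : List Bool) (z0 s0 : Int) :
    ((PySem.List.enumerate row s0).filterMap
        (fun wv => if wv.2 then some ((0:Int), (0:Int), z0, wv.1) else none)).Nodup := by
  induction row generalizing s0 with
  | nil => simp [PySem.List.enumerate_nil]
  | cons bv t ih =>
    cases bv with
    | true =>
      rw [pv_rowFlat_cons_true]
      refine List.Nodup.cons ?_ (ih (s0 + 1))
      intro hmem
      rw [pv_mem_rowFlat] at hmem
      obtain ⟨k, hk, heq, -⟩ := hmem
      simp only [Prod.mk.injEq] at heq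
      omega
    | false =>
      rw [pv_rowFlat_cons_false]
      exact ih (s0 + 1)

theorem pv_nodup_initAux (ip : List (List Bool)) (s : Int) :
    ((PySem.List.enumerate ip s).flatMap
        (fun zr => (PySem.List.enumerate zr.2 0).filterMap
          (fun wv => if wv.2 then some ((0:Int), (0:Int), zr.1, wv.1) else none))).Nodup := by
  induction ip generalizing s with
  | nil => simp [PySem.List.enumerate_nil]
  | cons row t ih =>
    rw [PySem.List.enumerate_cons, List.flatMap_cons]
    refine List.Nodup.append (pv_nodup_rowFlat row s 0) (ih (s + 1)) ?_
    intro v hv1 hv2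
    rw [pv_mem_rowFlat] at hv1
    rw [pv_mem_initAux] at hv2
    obtain ⟨k, hk, rfl, -⟩ := hv1
    obtain ⟨j, hj, k2, hk2, heq, -⟩ := hv2
    simp only [Prod.mk.injEq] at heq
    omega

theorem pv_len_rowFlat (row : List Bool) (z0 s0 : Int) :
    ((PySem.List.enumerate row s0).filterMap
        (fun wv => if wv.2 then some ((0:Int), (0:Int), z0, wv.1) else none)).length
      = row.countP id := by
  induction row generalizing s0 with
  | nil => simp [PySem.List.enumerate_nil]
  | cons bv t ih =>
    rw [List.countP_cons]
    cases bv with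
    | true => rw [pv_rowFlat_cons_true, List.length_cons, ih]; simp [id]
    | false => rw [pv_rowFlat_cons_false, ih]; simp [id]

theorem pv_len_initAux (ip : List (List Bool)) (s : Int) :
    ((PySem.List.enumerate ip s).flatMap
        (fun zr => (PySem.List.enumerate zr.2 0).filterMap
          (fun wv => if wv.2 then some ((0:Int), (0:Int), zr.1, wv.1) else none))).length
      = (ip.map fun row => row.countP id).sum := by
  induction ip generalizing s with
  | nil => simp [PySem.List.enumerate_nil]
  | cons row t ih =>
    rw [PySem.List.enumerate_cons, List.flatMap_cons, List.length_append,
      pv_len_rowFlat row s 0, ih (s + 1)]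
    simp

-- zero-cycle count: counting [[ip]] is the size of the initial sparse set
theorem pv_count0 (ip : List (List Bool)) : pvCountA [[ip]] = ((pvInitB ip).length : Int) := by
  rw [pv_countAD]
  have hlen : (pvInitB ip).length = (ip.map fun row => row.countP id).sum := by
    unfold pvInitB
    rw [PySem.Set.ofList_eq_self_of_nodup _ (pv_initList_eq ip ▸ pv_nodup_initAux ip 0),
      pv_initList_eq]
    exact pv_len_initAux ip 0
  rw [hlen, Nat.cast_list_sum, List.map_map]
  have hflat : (([[ip]] : PvGrid).flatMap fun cu => cu.flatMap fun p => p.flatMap fun s => s)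
      = ip.flatMap fun s => s := by simp
  unfold pvCountD
  rw [hflat, pv_sum_flatMap]
  apply congrArg
  apply List.map_congr_left
  intro row _
  rw [PySem.List.sum_map_ite_one_zero (fun v : Bool => v) row]
  simp only [Function.comp]
  norm_cast

-- the rectangle of index tuples
def pvIdx (a b c d : Nat) : List PvC :=
  (PySem.List.pyRange 0 (a : Int) 1).flatMap fun x =>
    (PySem.List.pyRange 0 (b : Int) 1).flatMap fun y =>
      (PySem.List.pyRange 0 (c : Int) 1).flatMap fun z =>
        (PySem.List.pyRange 0 (d : Int) 1).map fun w => (x, y, z, w)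

theorem pv_mem_idx (a b c d : Nat) (v : PvC) :
    v ∈ pvIdx a b c d ↔ (0 ≤ v.1 ∧ v.1 < (a : Int)) ∧ (0 ≤ v.2.1 ∧ v.2.1 < (b : Int))
      ∧ (0 ≤ v.2.2.1 ∧ v.2.2.1 < (c : Int)) ∧ (0 ≤ v.2.2.2 ∧ v.2.2.2 < (d : Int)) := by
  obtain ⟨x, y, z, w⟩ := v
  simp only [pvIdx, List.mem_flatMap, List.mem_map, PySem.List.mem_pyRange_one, Prod.mk.injEq]
  constructor
  · rintro ⟨x', hx', y', hy', z', hz', w', hw', rfl, rfl, rfl, rfl⟩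
    exact ⟨hx', hy', hz', hw'⟩
  · rintro ⟨hx, hy, hz, hw⟩
    exact ⟨x, hx, y, hy, z, hz, w, hw, rfl, rfl, rfl, rfl⟩

theorem pv_nodup_idx (a b c d : Nat) : (pvIdx a b c d).Nodup := by
  unfold pvIdx
  apply List.nodup_flatMap.mpr
  refine ⟨?_, ?_⟩
  · intro x _
    apply List.nodup_flatMap.mpr
    refine ⟨?_, ?_⟩
    · intro y _
      apply List.nodup_flatMap.mpr
      refine ⟨?_, ?_⟩
      · intro z _
        exact List.Nodup.map (fun w w' h => by simpa using h) (PySem.List.nodup_pyRange_one 0 (d:Int))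
      · apply List.Pairwise.imp ?_ (PySem.List.pairwise_lt_pyRange_one 0 (c:Int))
        intro z z' hlt v hv1 hv2
        simp only [List.mem_map] at hv1 hv2
        obtain ⟨w1, -, rfl⟩ := hv1
        obtain ⟨w2, -, heq⟩ := hv2
        simp only [Prod.mk.injEq] at heq
        omega
    · apply List.Pairwise.imp ?_ (PySem.List.pairwise_lt_pyRange_one 0 (b:Int))
      intro y y' hlt v hv1 hv2
      simp only [List.mem_flatMap, List.mem_map] at hv1 hv2
      obtain ⟨z1, -, w1, -, rfl⟩ := hv1
      obtain ⟨z2, -, w2, -, heq⟩ := hv2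
      simp only [Prod.mk.injEq] at heq
      omega
  · apply List.Pairwise.imp ?_ (PySem.List.pairwise_lt_pyRange_one 0 (a:Int))
    intro x x' hlt v hv1 hv2
    simp only [List.mem_flatMap, List.mem_map] at hv1 hv2
    obtain ⟨y1, -, z1, -, w1, -, rfl⟩ := hv1
    obtain ⟨y2, -, z2, -, w2, -, heq⟩ := hv2
    simp only [Prod.mk.injEq] at heq
    omega

theorem pv_sum_over_list {α : Type} (l : List α) (f : α → Int) (d0 : α) :
    (l.map f).sum = ((PySem.List.pyRange 0 (l.length : Int) 1).map
      fun i => f (l.getD i.toNat d0)).sum := by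
  rw [PySem.List.pyRange_zero_nat, List.map_map]
  apply congrArg
  apply List.ext_getElem
  · simp
  · intro i h1 h2
    simp only [List.getElem_map, List.getElem_range, Function.comp, Int.toNat_natCast]
    rw [List.getD_eq_getElem _ _ (by simpa using h1)]

-- in-range cells are the getD chain
theorem pv_cell_getD_chain (G : PvGrid) (a b c d : Nat) (hR : PvRect G a b c d)
    (x y z w : Int) (hx : 0 ≤ x ∧ x < (a : Int)) (hy : 0 ≤ y ∧ y < (b : Int))
    (hz : 0 ≤ z ∧ z < (c : Int)) (hw : 0 ≤ w ∧ w < (d : Int)) :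
    pvCell G x y z w = (((G.getD x.toNat []).getD y.toNat []).getD z.toNat []).getD w.toNat false := by
  obtain ⟨hlen, hmem⟩ := hR
  have hx' : x.toNat < G.length := by omega
  rw [pvCell, if_pos (by rw [hlen]; exact hx),
    List.getD_eq_getElem _ _ hx']
  obtain ⟨hbl, hm2⟩ := hmem _ (List.getElem_mem hx')
  have hy' : y.toNat < G[x.toNat].length := by omega
  rw [pvCellC, if_pos (by rw [hbl]; exact hy),
    List.getD_eq_getElem _ _ hy']
  obtain ⟨hcl, hm3⟩ := hm2 _ (List.getElem_mem hy')
  have hz' : z.toNat < G[x.toNat][y.toNat].length := by omega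
  rw [pvCellP, if_pos (by rw [hcl]; exact hz),
    List.getD_eq_getElem _ _ hz']
  have hdl := hm3 _ (List.getElem_mem hz')
  rw [pvCellS, if_pos (by rw [hdl]; exact hw)]

theorem pv_countD_idx (G : PvGrid) (a b c d : Nat) (hR : PvRect G a b c d) :
    pvCountD G = ((pvIdx a b c d).map
      fun q => if pvCell G q.1 q.2.1 q.2.2.1 q.2.2.2 then (1 : Int) else 0).sum := by
  obtain ⟨hlen, hmem⟩ := hR
  have hL : pvCountD G = (G.map fun cu => (cu.map fun p => (p.map fun st =>
      (st.map fun v => if v then (1:Int) else 0).sum).sum).sum).sum := by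
    unfold pvCountD
    rw [pv_sum_flatMap]
    apply congrArg
    apply List.map_congr_left
    intro cu _
    rw [pv_sum_flatMap]
    apply congrArg
    apply List.map_congr_left
    intro p _
    rw [pv_sum_flatMap]
  have hRHS : ((pvIdx a b c d).map
        fun q => if pvCell G q.1 q.2.1 q.2.2.1 q.2.2.2 then (1 : Int) else 0).sum
      = ((PySem.List.pyRange 0 (a:Int) 1).map fun x =>
          ((PySem.List.pyRange 0 (b:Int) 1).map fun y =>
            ((PySem.List.pyRange 0 (c:Int) 1).map fun z =>
              ((PySem.List.pyRange 0 (d:Int) 1).map fun w =>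
                if pvCell G x y z w then (1:Int) else 0).sum).sum).sum).sum := by
    unfold pvIdx
    rw [pv_sum_flatMap]
    apply congrArg
    apply List.map_congr_left
    intro x _
    rw [pv_sum_flatMap]
    apply congrArg
    apply List.map_congr_left
    intro y _
    rw [pv_sum_flatMap]
    apply congrArg
    apply List.map_congr_left
    intro z _
    rw [List.map_map]
    rfl
  rw [hL, hRHS, pv_sum_over_list G _ [], hlen]
  apply congrArg
  apply List.map_congr_left
  intro x hxm
  rw [PySem.List.mem_pyRange_one] at hxm
  have hx' : x.toNat < G.length := by omega
  have hcu : G.getD x.toNat [] ∈ G := by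
    rw [List.getD_eq_getElem _ _ hx']
    exact List.getElem_mem hx'
  obtain ⟨hbl, hm2⟩ := hmem _ hcu
  rw [pv_sum_over_list (G.getD x.toNat []) _ [], hbl]
  apply congrArg
  apply List.map_congr_left
  intro y hym
  rw [PySem.List.mem_pyRange_one] at hym
  have hy' : y.toNat < (G.getD x.toNat []).length := by omega
  have hp : (G.getD x.toNat []).getD y.toNat [] ∈ G.getD x.toNat [] := by
    rw [List.getD_eq_getElem _ _ hy']
    exact List.getElem_mem hy'
  obtain ⟨hcl, hm3⟩ := hm2 _ hp
  rw [pv_sum_over_list ((G.getD x.toNat []).getD y.toNat []) _ [], hcl]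
  apply congrArg
  apply List.map_congr_left
  intro z hzm
  rw [PySem.List.mem_pyRange_one] at hzm
  have hz' : z.toNat < ((G.getD x.toNat []).getD y.toNat []).length := by omega
  have hst : ((G.getD x.toNat []).getD y.toNat []).getD z.toNat []
      ∈ (G.getD x.toNat []).getD y.toNat [] := by
    rw [List.getD_eq_getElem _ _ hz']
    exact List.getElem_mem hz'
  have hdl := hm3 _ hst
  rw [pv_sum_over_list (((G.getD x.toNat []).getD y.toNat []).getD z.toNat []) _ false, hdl]
  apply congrArg
  apply List.map_congr_left
  intro w hwm
  rw [PySem.List.mem_pyRange_one] at hwm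
  rw [pv_cell_getD_chain G a b c d ⟨hlen, hmem⟩ x y z w
    (by omega) (by omega) (by omega) (by omega)]

theorem pv_countP_sub (L T : List PvC) (hL : L.Nodup) (hT : T.Nodup)
    (hsub : ∀ c ∈ T, c ∈ L) : (L.countP fun v => decide (v ∈ T)) = T.length := by
  rw [List.countP_eq_length_filter]
  have hperm : (L.filter fun v => decide (v ∈ T)).Perm T := by
    rw [List.perm_ext_iff_of_nodup (hL.filter _) hT]
    intro q
    simp only [List.mem_filter, decide_eq_true_iff]
    constructor
    · rintro ⟨-, h⟩; exact h
    · intro h; exact ⟨hsub q h, h⟩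
  exact hperm.length_eq

def pvShift4 (s : Int) (q : PvC) : PvC := (q.1 - s, q.2.1 - s, q.2.2.1 - s, q.2.2.2 - s)

theorem pv_shift4_inj (s : Int) : Function.Injective (pvShift4 s) := by
  rintro ⟨a1, a2, a3, a4⟩ ⟨b1, b2, b3, b4⟩ h
  simp only [pvShift4, Prod.mk.injEq] at h ⊢
  omega

-- counting a matched dense grid is the size of the sparse set
theorem pv_count_of_dm (G : PvGrid) (S : PySem.Set PvC) (s : Int) (a b c d : Nat)
    (hR : PvRect G a b c d) (hDM : PvDM G S s) (hS : List.Nodup S) :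
    pvCountA G = (S.length : Int) := by
  rw [pv_countAD, pv_countD_idx G a b c d hR]
  have h1 : ∀ q ∈ pvIdx a b c d, (if pvCell G q.1 q.2.1 q.2.2.1 q.2.2.2 then (1:Int) else 0)
      = if decide (pvShift4 s q ∈ S) then (1:Int) else 0 := by
    intro q _
    rw [hDM q.1 q.2.1 q.2.2.1 q.2.2.2]
    rfl
  rw [List.map_congr_left h1,
    PySem.List.sum_map_ite_one_zero (fun q => decide (pvShift4 s q ∈ S)) (pvIdx a b c d)]
  congr 1
  have h3 : ((pvIdx a b c d).countP fun q => decide (pvShift4 s q ∈ S))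
      = (((pvIdx a b c d).map (pvShift4 s)).countP fun v => decide (v ∈ S)) := by
    rw [List.countP_map]
    rfl
  rw [h3]
  apply pv_countP_sub _ _ (List.Nodup.map (pv_shift4_inj s) (pv_nodup_idx a b c d)) hS
  intro cc hcc
  have htup : ((cc.1 + s - s, cc.2.1 + s - s, cc.2.2.1 + s - s, cc.2.2.2 + s - s) : PvC)
      = cc := by
    simp
  have hcell : pvCell G (cc.1 + s) (cc.2.1 + s) (cc.2.2.1 + s) (cc.2.2.2 + s) = true := by
    rw [hDM, htup]
    exact decide_eq_true hcc
  have hrange := pv_cell_true_range G a b c d hR _ _ _ _ hcell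
  rw [List.mem_map]
  refine ⟨(cc.1 + s, cc.2.1 + s, cc.2.2.1 + s, cc.2.2.2 + s), ?_, ?_⟩
  · rw [pv_mem_idx]
    exact ⟨hrange.1, hrange.2.1, hrange.2.2.1, hrange.2.2.2⟩
  · simp [pvShift4]

-- master fold: A's fold counted equals the sparse fold's size
theorem pv_master (l : List Int) (G : PvGrid) (S : PySem.Set PvC) (s : Int) (a b c d : Nat)
    (ha : 1 ≤ a) (hb : 1 ≤ b) (hc1 : 1 ≤ c) (hR : PvRect G a b c d)
    (hDM : PvDM G S s) (hS : List.Nodup S) :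
    pvCountA (l.foldl (fun g _ => pvStepA g) G)
      = (((l.foldl (fun S _ => pvStepSp S) S)).length : Int) := by
  induction l generalizing G S s a b c d with
  | nil => exact pv_count_of_dm G S s a b c d hR hDM hS
  | cons x t ih =>
    simp only [List.foldl_cons]
    rw [pv_stepAD G a b c d ha hb hc1 hR]
    exact ih (pvStepD G) (pvStepSp S) (s + 1) (a+2) (b+2) (c+2) (d+2)
      (by omega) (by omega) (by omega)
      (pv_rect_stepD G a b c d ha hb hc1 hR)
      (pv_dm_step G S s a b c d ha hb hc1 hR hDM hS)
      (pv_nodup_stepSp S)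

-- ===== VERDICT (by name: the statement is the Claim_ definition above) =====
theorem simulate_4d_cycles_spec : Claim_equal_simulate_4d_cycles := by
  intro ip n _ hPre
  unfold Spec_simulate_4d_cycles simulate_4d_cycles simulate_4d_cycles_alt
  by_cases hn : 0 < n
  · obtain ⟨hne, hrect⟩ := hPre hn
    apply pv_master (PySem.List.pyRange 0 n 1) [[ip]] (pvInitB ip) 0 1 1 ip.length
        (ip.headD []).length (le_refl _) (le_refl _) (by cases ip with
          | nil => exact absurd rfl hne
          | cons h t => simp)
    · refine ⟨rfl, ?_⟩
      intro cu hcu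
      simp at hcu
      subst hcu
      exact ⟨rfl, fun p hp => by simp at hp; subst hp; exact ⟨rfl, fun s hs => hrect s hs⟩⟩
    · exact pv_dm_init ip
    · exact pv_nodup_init ip
  · rw [show PySem.List.pyRange 0 n 1 = [] from PySem.List.pyRange_one_eq_nil (by omega)]
    exact pv_count0 ip
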